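-- pv_equiv track=rewrite | github.com/linlance07/Leet_Codes | Minimum X (xor) A - GFG/minimum-x-xor-a.py | minVal
-- ===== SOURCE A (Python) =====
-- def minVal(a, b):
--     B = bin(b)[2:]
--     b_one = B.count('1')
--     A = bin(a)[2:]
--     ans = []
--     for i in range(len(A)):
--         if A[i]=='1':
--             if b_one:
--                 ans.append('1')
--                 b_one -= 1
--             else:
--                 ans.append('0')
--         else:
--             ans.append('0')
--     for j in range(len(A)-1,-1,-1):
--         if ans[j]=='0':
--             if b_one:
--                 ans[j] = '1'
--                 b_one -= 1
--     if b_one: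
--         ans = (['1']*b_one) + ans
--     x = "".join(ans)
--     return int(x,2)
-- ===== SOURCE B (Python) =====
-- def minVal(a, b):
--     # One forward pass with precomputed counts instead of A's forward pass + backward in-place fill.
--     k = bin(b).count('1')          # number of set bits to place (sign/'0b' chars never count)
--     A = bin(a)[2:]                 # same digit view of a as the original
--     ka = A.count('1')
--     if k <= ka:
--         # keep only the first (most significant) k ones
--         out = []
--         seen = 0
--         for c in A:
--             if c == '1' and seen < k:
--                 out.append('1')
--                 seen += 1
--             else:
--                 out.append('0')
--         return int(''.join(out), 2)
--     # keep all ones; the lowest (k-ka) zero slots become ones, i.e. only the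
--     # first `keep` zero slots stay zero; any still-missing ones go in front
--     z = len(A) - ka
--     keep = z - min(k - ka, z)
--     out = []
--     seen0 = 0
--     for c in A:
--         if c == '1':
--             out.append('1')
--         elif seen0 < keep:
--             out.append('0')
--             seen0 += 1
--         else:
--             out.append('1')
--     s = '1' * ((k - ka) - (z - keep)) + ''.join(out)
--     return int(s, 2)
-- ===== Notes on version B (the rewrite author's own statement) =====
-- stated objective: alternative
-- what changed: B precomputes the popcounts of a and b up front and builds the answer in a single forward pass per branch (keep the top k ones, or keep only the leftmost surviving zero slots), eliminating A's second backward in-place fill loop over the index range.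
import Mathlib
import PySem

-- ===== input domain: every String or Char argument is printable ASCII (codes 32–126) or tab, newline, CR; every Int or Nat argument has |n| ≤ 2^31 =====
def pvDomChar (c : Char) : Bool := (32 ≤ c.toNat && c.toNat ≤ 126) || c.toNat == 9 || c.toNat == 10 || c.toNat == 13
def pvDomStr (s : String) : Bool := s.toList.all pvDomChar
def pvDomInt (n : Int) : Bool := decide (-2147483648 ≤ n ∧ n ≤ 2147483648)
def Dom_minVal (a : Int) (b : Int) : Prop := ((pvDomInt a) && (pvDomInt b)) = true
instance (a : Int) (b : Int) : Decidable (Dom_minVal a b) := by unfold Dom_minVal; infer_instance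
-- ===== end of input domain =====

-- B replaces A's backward in-place fill pass by precomputed popcounts and a single
-- forward pass per branch (alternative decomposition; equivalence is proved totally).

-- ===== PORT A =====

-- digits of bin(n) for n > 0, most significant first ([] for 0)
def natBinGo : Nat → List Char
  | 0 => []
  | n+1 => natBinGo ((n+1)/2) ++ [if (n+1) % 2 = 1 then '1' else '0']
  decreasing_by exact Nat.div_lt_self (Nat.succ_pos n) (by omega)

-- bin(n)[2:] for an arbitrary int n, exactly as Python slices it:
-- bin(-5) = '-0b101', so [2:] keeps the letter 'b' in front of the digits.
def pyBinDigits (n : Int) : List Char :=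
  if n < 0 then 'b' :: natBinGo n.natAbs
  else if n = 0 then ['0'] else natBinGo n.natAbs

-- int(x, 2); exact here because the joined list only ever holds '0'/'1' characters
def valBin (l : List Char) : Int :=
  l.foldl (fun acc c => 2 * acc + (if c = '1' then 1 else 0)) 0

-- first loop: forward over A's characters with the remaining budget b_one
def loop1 : List Char → Nat → List Char × Nat
  | [], r => ([], r)
  | c :: t, r =>
      if c = '1' then
        if r ≠ 0 then
          let p := loop1 t (r - 1); ('1' :: p.1, p.2)
        else
          let p := loop1 t r; ('0' :: p.1, p.2)
      else
        let p := loop1 t r; ('0' :: p.1, p.2)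

-- second loop: for j in range(m-1, -1, -1), reading/setting ans[j] in place
def loop2 : List Char → Nat → Nat → List Char × Nat
  | ans, r, 0 => (ans, r)
  | ans, r, m+1 =>
      if ans.getD m ' ' = '0' then
        if r ≠ 0 then loop2 (ans.set m '1') (r - 1) m
        else loop2 ans r m
      else loop2 ans r m

def minVal (a : Int) (b : Int) : Int :=
  let k := (pyBinDigits b).count '1'
  let A := pyBinDigits a
  let p := loop1 A k
  let q := loop2 p.1 p.2 p.1.length
  let ans := if q.2 ≠ 0 then List.replicate q.2 '1' ++ q.1 else q.1
  valBin ans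

-- ===== PORT B =====

-- keep the first k ones, everything else becomes '0' (seen = ones already kept)
def keepPass : List Char → Nat → Nat → List Char
  | [], _, _ => []
  | c :: t, k, seen =>
      if c = '1' ∧ seen < k then '1' :: keepPass t k (seen + 1)
      else '0' :: keepPass t k seen

-- keep the first `keep` zero slots as '0', every other slot becomes '1'
def fillPass : List Char → Nat → Nat → List Char
  | [], _, _ => []
  | c :: t, keep, s =>
      if c = '1' then '1' :: fillPass t keep s
      else if s < keep then '0' :: fillPass t keep (s + 1)
      else '1' :: fillPass t keep s

def minVal_alt (a : Int) (b : Int) : Int :=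
  let k := (pyBinDigits b).count '1'
  let A := pyBinDigits a
  let ka := A.count '1'
  if k ≤ ka then valBin (keepPass A k 0)
  else
    let z := A.length - ka
    let keep := z - min (k - ka) z
    valBin (List.replicate ((k - ka) - (z - keep)) '1' ++ fillPass A keep 0)

-- ===== PRECONDITION & SPEC =====
def Spec_minVal (a : Int) (b : Int) (out : Int) : Prop := out = minVal_alt a b
instance (a : Int) (b : Int) (out : Int) : Decidable (Spec_minVal a b out) := by unfold Spec_minVal; infer_instance

-- ===== CLAIM (what is proved, stated in full; the proofs are below) =====
def Claim_equal_minVal : Prop := ∀ (a : Int) (b : Int), Dom_minVal a b → Spec_minVal a b (minVal a b)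

-- ===== LEMMAS AND PROOFS =====

-- proof-only helpers
def normCh (l : List Char) : List Char := l.map (fun c => if c = '1' then '1' else '0')
def count0 (l : List Char) : Nat := l.countP (fun c => decide (c ≠ '1'))

-- A's backward fill, rephrased as a front-first recursion on the REVERSED list
def frontFill : List Char → Nat → List Char × Nat
  | [], r => ([], r)
  | c :: t, r =>
      if c = '0' ∧ r ≠ 0 then
        let p := frontFill t (r - 1); ('1' :: p.1, p.2)
      else
        let p := frontFill t r; (c :: p.1, p.2)

theorem loop1_keep (l : List Char) : ∀ k seen, seen ≤ k →
    (loop1 l (k - seen)).1 = keepPass l k seen := by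
  induction l with
  | nil => intro k seen _; simp [loop1, keepPass]
  | cons c t ih =>
      intro k seen hs
      by_cases hc : c = '1'
      · by_cases hr : k - seen = 0
        · have hlt : ¬ seen < k := by omega
          have h0 := ih k seen hs
          rw [hr] at h0
          simp [loop1, keepPass, hc, hr, hlt, h0]
        · have hlt : seen < k := by omega
          have he : k - seen - 1 = k - (seen + 1) := by omega
          have h0 := ih k (seen + 1) (by omega)
          simp [loop1, keepPass, hc, hr, hlt, he, h0]
      · simp [loop1, keepPass, hc, ih k seen hs]

theorem loop1_rem (l : List Char) : ∀ r, (loop1 l r).2 = r - min r (l.count '1') := by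
  induction l with
  | nil => intro r; simp [loop1]
  | cons c t ih =>
      intro r
      by_cases hc : c = '1'
      · by_cases hr : r = 0
        · simp [loop1, hc, hr, ih]
        · simp only [loop1, hc, if_pos hr]
          simp [ih]
          omega
      · simp [loop1, hc, ih]

theorem loop2_zero (l : List Char) : ∀ m, loop2 l 0 m = (l, 0) := by
  intro m
  induction m with
  | zero => simp [loop2]
  | succ m ih => simp [loop2, ih]

theorem keepPass_norm (l : List Char) : ∀ k seen, l.count '1' + seen ≤ k →
    keepPass l k seen = normCh l := by
  induction l with
  | nil => intro k seen _; simp [keepPass, normCh]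
  | cons c t ih =>
      intro k seen h
      by_cases hc : c = '1'
      · have hlt : seen < k := by
          have := h; simp [hc] at this; omega
        have : t.count '1' + (seen + 1) ≤ k := by
          have := h; simp [hc] at this; omega
        simp [keepPass, hc, hlt, normCh, ih _ _ this]
      · have : t.count '1' + seen ≤ k := by
          have := h; simp [hc] at this; omega
        simp [keepPass, hc, normCh, ih _ _ this]

theorem loop2_append (t : List Char) (x : Char) : ∀ m r, m ≤ t.length →
    loop2 (t ++ [x]) r m = ((loop2 t r m).1 ++ [x], (loop2 t r m).2) := by
  intro m
  induction m generalizing t with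
  | zero => intro r _; simp [loop2]
  | succ m ih =>
      intro r hm
      have hlt : m < t.length := by omega
      have hget : (t ++ [x])[m]? = t[m]? := List.getElem?_append_left hlt
      have hset : (t ++ [x]).set m '1' = t.set m '1' ++ [x] := List.set_append_left m '1' hlt
      simp only [loop2, List.getD_eq_getElem?_getD, hget, hset]
      by_cases h0 : t[m]?.getD ' ' = '0'
      · by_cases hr : r = 0
        · simp only [h0, if_pos, hr, ne_eq, not_true_eq_false, if_false]
          exact ih t 0 (by omega)
        · simp only [h0, if_pos, ne_eq, hr, not_false_eq_true]
          exact ih (t.set m '1') (r - 1) (by simp; omega)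
      · simp only [h0, if_false]
        exact ih t r (by omega)

theorem loop2_frontFill (l : List Char) : ∀ r,
    loop2 l r l.length = ((frontFill l.reverse r).1.reverse, (frontFill l.reverse r).2) := by
  induction l using List.reverseRecOn with
  | nil => intro r; simp [loop2, frontFill]
  | append_singleton t c ih =>
      intro r
      have hlen : (t ++ [c]).length = t.length + 1 := by simp
      have hget : (t ++ [c]).getD t.length ' ' = c := by
        simp [List.getD_eq_getElem?_getD]
      have hset : (t ++ [c]).set t.length '1' = t ++ ['1'] := by
        rw [List.set_append_right _ _ (le_refl _)]; simp
      rw [hlen]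
      by_cases hc : c = '0'
      · subst hc
        by_cases hr : r = 0
        · subst hr
          simp only [loop2, hget, ne_eq, not_true_eq_false, if_false]
          rw [loop2_append t '0' t.length 0 (le_refl _), ih 0]
          simp [frontFill]
        · simp only [loop2, hget, ne_eq, hr, not_false_eq_true, if_true]
          rw [hset, loop2_append t '1' t.length (r - 1) (le_refl _), ih (r - 1)]
          simp [frontFill, hr]
      · simp only [loop2, hget, if_neg hc]
        rw [loop2_append t c t.length r (le_refl _), ih r]
        simp [frontFill, hc]

theorem count0_append_singleton (t : List Char) (c : Char) :
    count0 (t ++ [c]) = count0 t + (if c = '1' then 0 else 1) := by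
  by_cases hc : c = '1' <;> simp [count0, hc]

theorem fillPass_append (c : Char) (t : List Char) : ∀ keep s, s ≤ keep →
    fillPass (t ++ [c]) keep s =
      fillPass t keep s ++
        [if c = '1' then '1' else if min (s + count0 t) keep < keep then '0' else '1'] := by
  induction t with
  | nil =>
      intro keep s hs
      by_cases hc : c = '1'
      · simp [fillPass, hc]
      · by_cases h : s < keep <;>
          simp [fillPass, hc, count0, h]
  | cons d t ih =>
      intro keep s hs
      by_cases hd : d = '1'
      · simp only [List.cons_append, fillPass, hd]
        rw [ih keep s hs]
        simp [count0]
      · by_cases hlt : s < keep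
        · simp only [List.cons_append, fillPass, if_neg hd, if_pos hlt]
          rw [ih keep (s + 1) (by omega)]
          have : s + 1 + count0 t = s + count0 (d :: t) := by simp [count0, hd]; omega
          rw [this]
        · simp only [List.cons_append, fillPass, if_neg hd, if_neg hlt]
          rw [ih keep s hs]
          have hsk : s = keep := by omega
          have h1 : min (s + count0 t) keep = keep := by omega
          have h2 : min (s + count0 (d :: t)) keep = keep := by
            simp [count0, hd]; omega
          rw [h1, h2]

theorem fillPass_norm (l : List Char) : ∀ keep s, s + count0 l ≤ keep →
    fillPass l keep s = normCh l := by
  induction l with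
  | nil => intro keep s _; simp [fillPass, normCh]
  | cons c t ih =>
      intro keep s h
      by_cases hc : c = '1'
      · have : s + count0 t ≤ keep := by simp [count0, hc] at h ⊢; omega
        simp [fillPass, hc, normCh, ih _ _ this]
      · have h' : s + 1 + count0 t ≤ keep := by simp [count0, hc] at h ⊢; omega
        have hlt : s < keep := by omega
        simp [fillPass, hc, hlt, normCh, ih _ _ h']

theorem frontFill_zero (l : List Char) : frontFill l 0 = (l, 0) := by
  induction l with
  | nil => simp [frontFill]
  | cons c t ih => simp [frontFill, ih]

theorem frontFill_cons_one (t : List Char) (r : Nat) :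
    frontFill ('1' :: t) r = ('1' :: (frontFill t r).1, (frontFill t r).2) := by
  simp [frontFill]

theorem frontFill_cons_zero_pos (t : List Char) (r : Nat) (hr : r ≠ 0) :
    frontFill ('0' :: t) r = ('1' :: (frontFill t (r - 1)).1, (frontFill t (r - 1)).2) := by
  simp [frontFill, hr]

theorem frontFill_cons_zero_zero (t : List Char) :
    frontFill ('0' :: t) 0 = ('0' :: (frontFill t 0).1, (frontFill t 0).2) := by
  simp [frontFill]

theorem core (l : List Char) : ∀ r,
    (frontFill (normCh l).reverse r).1.reverse = fillPass l (count0 l - min r (count0 l)) 0 ∧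
    (frontFill (normCh l).reverse r).2 = r - min r (count0 l) := by
  induction l using List.reverseRecOn with
  | nil => intro r; simp [frontFill, fillPass, count0, normCh]
  | append_singleton t c ih =>
      intro r
      by_cases hc : c = '1'
      · subst hc
        have hn : (normCh (t ++ ['1'])).reverse = '1' :: (normCh t).reverse := by
          simp [normCh]
        rw [hn, frontFill_cons_one]
        obtain ⟨ih1, ih2⟩ := ih r
        have hz : count0 (t ++ ['1']) = count0 t := by
          rw [count0_append_singleton]; simp
        refine ⟨?_, by simpa [hz] using ih2⟩
        rw [List.reverse_cons, ih1, hz,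
          fillPass_append '1' t _ 0 (by omega), if_pos rfl]
      · have hn : (normCh (t ++ [c])).reverse = '0' :: (normCh t).reverse := by
          simp [normCh, hc]
        have hz : count0 (t ++ [c]) = count0 t + 1 := by
          rw [count0_append_singleton, if_neg hc]
        rw [hn]
        by_cases hr : r = 0
        · subst hr
          rw [frontFill_cons_zero_zero, frontFill_zero]
          refine ⟨?_, by simp [hz]⟩
          rw [List.reverse_cons, List.reverse_reverse, hz]
          simp only [Nat.zero_min, Nat.sub_zero]
          rw [fillPass_append c t _ 0 (by omega), if_neg hc,
            fillPass_norm t _ 0 (by omega)]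
          have hlt : min (0 + count0 t) (count0 t + 1) < count0 t + 1 := by omega
          rw [if_pos hlt]
        · rw [frontFill_cons_zero_pos _ _ hr]
          obtain ⟨ih1, ih2⟩ := ih (r - 1)
          have hkeq : count0 t - min (r - 1) (count0 t) =
              count0 (t ++ [c]) - min r (count0 (t ++ [c])) := by rw [hz]; omega
          refine ⟨?_, by rw [ih2, hz]; omega⟩
          rw [List.reverse_cons, ih1, hkeq,
            fillPass_append c t _ 0 (by omega), if_neg hc]
          have hge : ¬ min (0 + count0 t) (count0 (t ++ [c]) - min r (count0 (t ++ [c]))) <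
              count0 (t ++ [c]) - min r (count0 (t ++ [c])) := by rw [hz]; omega
          rw [if_neg hge]

theorem count0_eq (l : List Char) : count0 l = l.length - l.count '1' := by
  induction l with
  | nil => simp [count0]
  | cons c t ih =>
      have hle : t.count '1' ≤ t.length := List.count_le_length
      by_cases hc : c = '1'
      · simp [count0, hc] at ih ⊢; omega
      · simp [count0, hc] at ih ⊢; omega

theorem minVal_eq (a b : Int) : minVal a b = minVal_alt a b := by
  unfold minVal minVal_alt
  dsimp only
  generalize List.count '1' (pyBinDigits b) = k
  generalize pyBinDigits a = A
  have h1 : (loop1 A k).1 = keepPass A k 0 := by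
    simpa using loop1_keep A k 0 (Nat.zero_le _)
  have h2 : (loop1 A k).2 = k - min k (A.count '1') := loop1_rem A k
  have hle : A.count '1' ≤ A.length := List.count_le_length
  by_cases hkk : k ≤ A.count '1'
  · rw [if_pos hkk, h1]
    have hr0 : (loop1 A k).2 = 0 := by rw [h2]; omega
    rw [hr0, loop2_zero]
    simp
  · rw [if_neg hkk]
    have hr1 : (loop1 A k).2 = k - A.count '1' := by rw [h2]; omega
    have hnorm : keepPass A k 0 = normCh A := keepPass_norm A k 0 (by omega)
    rw [h1, hr1, hnorm, loop2_frontFill (normCh A) (k - A.count '1')]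
    obtain ⟨hc1, hc2⟩ := core A (k - A.count '1')
    have hcnt : count0 A = A.length - A.count '1' := count0_eq A
    rw [hc1, hc2]
    have e1 : A.length - A.count '1' - min (k - A.count '1') (A.length - A.count '1') =
        count0 A - min (k - A.count '1') (count0 A) := by rw [hcnt]
    rw [e1]
    have e2 : k - A.count '1' -
        (A.length - A.count '1' -
          (count0 A - min (k - A.count '1') (count0 A))) =
        (k - A.count '1') - min (k - A.count '1') (count0 A) := by rw [hcnt]; omega
    rw [e2]
    by_cases hrem : (k - A.count '1') - min (k - A.count '1') (count0 A) = 0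
    · simp [hrem]
    · simp [hrem]

-- ===== VERDICT (by name: the statement is the Claim_ definition above) =====
theorem minVal_spec : Claim_equal_minVal := by
  intro a b _
  unfold Spec_minVal
  exact minVal_eq a b
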